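-- pv_equiv track=rewrite | github.com/RaeesRaqeeb/Python | Problem#4.py | Spyfunction
-- ===== SOURCE A (Python) =====
-- def Spyfunction(mylist):
--     zero_count=0
--     seven_counts=0
--     for x in mylist:
--         if(x==7 and zero_count!=2):
--             return False
--         elif(x==7 and zero_count==2):
--             return True
--         elif(x==0):
--             zero_count+=1
--     return False
-- ===== SOURCE B (Python) =====
-- def Spyfunction(mylist):
--     if 7 not in mylist:
--         return False
--     idx = mylist.index(7)
--     return mylist[:idx].count(0) == 2
-- ===== Notes on version B (the rewrite author's own statement) =====
-- stated objective: simpler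
-- what changed: Replaces A's stateful single-pass scan (zero counter, three-way branch, early returns) with a locate-then-count decomposition: find the first 7 and test whether the prefix before it contains exactly two zeros.
import Mathlib
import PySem

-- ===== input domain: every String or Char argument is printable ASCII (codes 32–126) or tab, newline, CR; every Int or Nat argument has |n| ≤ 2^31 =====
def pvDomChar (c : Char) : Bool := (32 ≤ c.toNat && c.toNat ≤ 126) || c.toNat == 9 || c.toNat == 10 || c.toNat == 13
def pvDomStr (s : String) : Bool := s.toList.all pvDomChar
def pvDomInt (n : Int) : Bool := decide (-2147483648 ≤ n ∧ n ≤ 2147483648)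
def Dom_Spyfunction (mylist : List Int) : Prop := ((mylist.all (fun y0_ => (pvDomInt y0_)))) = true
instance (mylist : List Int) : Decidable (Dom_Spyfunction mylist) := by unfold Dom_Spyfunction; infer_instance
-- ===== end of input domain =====

-- B replaces A's stateful scan with locate-the-first-7 then count zeros in the prefix (simpler decomposition, same cost).

-- ===== PORT A =====
-- the for-loop with its zero_count accumulator and early returns
def SpyLoop : List Int → Int → Bool
  | [], _ => false
  | x :: xs, zero_count =>
    if x == 7 && zero_count != 2 then false
    else if x == 7 && zero_count == 2 then true
    else if x == 0 then SpyLoop xs (zero_count + 1)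
    else SpyLoop xs zero_count

def Spyfunction (mylist : List Int) : Bool := SpyLoop mylist 0

-- ===== PORT B =====
def Spyfunction_alt (mylist : List Int) : Bool :=
  match PySem.List.index? mylist 7 with
  | none => false
  | some i => PySem.List.count (PySem.List.slice mylist none (some (i : Int))) 0 == 2

-- ===== PRECONDITION & SPEC =====
def Spec_Spyfunction (mylist : List Int) (out : Bool) : Prop := out = Spyfunction_alt mylist
instance (mylist : List Int) (out : Bool) : Decidable (Spec_Spyfunction mylist out) := by unfold Spec_Spyfunction; infer_instance

-- ===== CLAIM (what is proved, stated in full; the proofs are below) =====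
def Claim_equal_Spyfunction : Prop := ∀ (mylist : List Int), Dom_Spyfunction mylist → Spec_Spyfunction mylist (Spyfunction mylist)

-- ===== LEMMAS AND PROOFS =====
-- A's loop returns true iff there is a 7, and the zeros strictly before the first 7 together with the incoming counter make 2
theorem spyLoop_char (xs : List Int) : ∀ (zc : Int),
    SpyLoop xs zc =
      match PySem.List.index? xs 7 with
      | none => false
      | some i => decide (zc + ((xs.take i).count 0 : Int) = 2) := by
  induction xs with
  | nil => intro zc; simp [SpyLoop, PySem.List.index?_eq_idxOf?, List.idxOf?]
  | cons x xs ih =>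
    intro zc
    by_cases hx7 : x = 7
    · subst hx7
      rw [PySem.List.index?_cons_self]
      by_cases hz : zc = 2 <;> simp [SpyLoop, hz]
    · rw [PySem.List.index?_cons_of_ne xs hx7]
      cases h : List.idxOf? 7 xs with
      | none =>
        by_cases hx0 : x = 0 <;> simp [SpyLoop, hx7, hx0, ih, h]
      | some i =>
        by_cases hx0 : x = 0
        · subst hx0
          simp [SpyLoop, ih, h]
          omega
        · simp [SpyLoop, hx7, hx0, ih, h]

-- ===== VERDICT (by name: the statement is the Claim_ definition above) =====
theorem Spyfunction_spec : Claim_equal_Spyfunction := by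
  intro mylist _
  unfold Spec_Spyfunction Spyfunction Spyfunction_alt
  rw [spyLoop_char]
  cases h : PySem.List.index? mylist 7 with
  | none => rfl
  | some i =>
    simp only [PySem.List.slice_to_natCast, PySem.List.count_eq]
    rw [Bool.eq_iff_iff]
    simp
    omega
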